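-- pv_equiv track=rewrite | github.com/pm1100tm/Algorithm | programmers/level_1/lv_one_010.py | best_solution_i_think
-- ===== SOURCE A (Python) =====
-- from typing import List
--
-- def best_solution_i_think(answers: List[int]) -> List[int]:
--     student_answers = [
--         [1, 2, 3, 4, 5],
--         [2, 1, 2, 3, 2, 4, 2, 5],
--         [3, 3, 1, 1, 2, 2, 4, 4, 5, 5]
--     ]
--
--     scores = [0] * len(student_answers)
--
--     for index, answer in enumerate(answers):
--         for idx, student_answer in enumerate(student_answers):
--             if student_answer[index % len(student_answer)] == answer:
--                 scores[idx] += 1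
--
--     return [index + 1 for index, value in enumerate(scores) if value == max(scores)]
-- ===== SOURCE B (Python) =====
-- from typing import List
-- from collections import Counter
--
--
-- def best_solution_i_think(answers: List[int]) -> List[int]:
--     # The three patterns have periods 5, 8 and 10, whose lcm is 40, so a
--     # student's guess at position i depends only on i % 40.  Build one
--     # histogram of (position mod 40, answer) pairs in a single pass, then
--     # read each student's score off the 40-entry table — no per-student
--     # traversal of the answers at all.
--     patterns = [
--         [1, 2, 3, 4, 5],
--         [2, 1, 2, 3, 2, 4, 2, 5],
--         [3, 3, 1, 1, 2, 2, 4, 4, 5, 5],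
--     ]
--     freq = Counter((i % 40, a) for i, a in enumerate(answers))
--     scores = [sum(freq[(r, pat[r % len(pat)])] for r in range(40))
--               for pat in patterns]
--     best = max(scores)
--     return [i + 1 for i, s in enumerate(scores) if s == best]
-- ===== Notes on version B (the rewrite author's own statement) =====
-- stated objective: alternative
-- what changed: B exploits that all three patterns are periodic with period dividing 40: it builds a histogram of (index mod 40, answer) pairs in one pass and reads each student's score from that 40-entry table, instead of A's per-answer loop that tests every student's pattern at every position.
import Mathlib
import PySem

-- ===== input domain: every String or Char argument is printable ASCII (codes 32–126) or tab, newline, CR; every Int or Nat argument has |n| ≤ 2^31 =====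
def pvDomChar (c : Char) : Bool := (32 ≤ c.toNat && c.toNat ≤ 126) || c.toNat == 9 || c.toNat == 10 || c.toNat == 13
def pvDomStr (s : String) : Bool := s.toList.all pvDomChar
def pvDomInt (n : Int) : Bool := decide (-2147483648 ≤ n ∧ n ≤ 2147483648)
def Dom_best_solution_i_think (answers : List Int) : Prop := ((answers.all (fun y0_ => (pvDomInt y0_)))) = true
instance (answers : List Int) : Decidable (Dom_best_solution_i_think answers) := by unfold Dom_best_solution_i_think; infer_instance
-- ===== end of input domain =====

-- All three patterns repeat with period dividing 40, so B builds one histogram of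
-- (index mod 40, answer) pairs and reads every student's score off that 40-entry
-- table, instead of A's per-answer loop testing each pattern at each position
-- (objective: alternative; same cost).

-- ===== PORT A =====

def bsitStudents : List (List Int) := [[1, 2, 3, 4, 5], [2, 1, 2, 3, 2, 4, 2, 5], [3, 3, 1, 1, 2, 2, 4, 4, 5, 5]]

-- one iteration of A's outer loop body: the inner loop over enumerate(student_answers).
-- Indices from enumerate are nonnegative and (for scores) < 3, so getD/set (Nat-indexed)
-- and pyGetD on the in-range modulus are exact for Python's scores[idx] and
-- student_answer[index % len(student_answer)].
def bsitStep (scores : List Int) (ia : Int × Int) : List Int :=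
  (PySem.List.enumerate bsitStudents 0).foldl
    (fun scores is =>
      if PySem.List.pyGetD is.2 (PySem.Int.mod ia.1 (is.2.length : Int)) 0 = ia.2 then
        scores.set is.1.toNat (scores.getD is.1.toNat 0 + 1)
      else scores)
    scores

def best_solution_i_think (answers : List Int) : List Int :=
  let student_answers := bsitStudents
  let scores : List Int := List.replicate student_answers.length 0
  let scores := (PySem.List.enumerate answers 0).foldl bsitStep scores
  (PySem.List.enumerate scores 0).filterMap
    (fun iv => if iv.2 = (PySem.List.max? scores (fun v => v)).getD 0 then some (iv.1 + 1) else none)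

-- ===== PORT B =====

def best_solution_i_think_alt (answers : List Int) : List Int :=
  let patterns : List (List Int) := [[1, 2, 3, 4, 5], [2, 1, 2, 3, 2, 4, 2, 5], [3, 3, 1, 1, 2, 2, 4, 4, 5, 5]]
  -- Counter((i % 40, a) for i, a in enumerate(answers)); Counter lookup of a
  -- missing key is 0, exactly getD _ 0.
  let freq := PySem.Dict.counter ((PySem.List.enumerate answers 0).map (fun ia => (PySem.Int.mod ia.1 40, ia.2)))
  let scores := patterns.map (fun pat =>
    ((PySem.List.pyRange 0 40 1).map (fun r =>
      freq.getD (r, PySem.List.pyGetD pat (PySem.Int.mod r (pat.length : Int)) 0) 0)).sum)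
  let best := (PySem.List.max? scores (fun v => v)).getD 0
  (PySem.List.enumerate scores 0).filterMap
    (fun iv => if iv.2 = best then some (iv.1 + 1) else none)

-- ===== PRECONDITION & SPEC =====
def Spec_best_solution_i_think (answers : List Int) (out : List Int) : Prop := out = best_solution_i_think_alt answers
instance (answers : List Int) (out : List Int) : Decidable (Spec_best_solution_i_think answers out) := by unfold Spec_best_solution_i_think; infer_instance

-- ===== CLAIM (what is proved, stated in full; the proofs are below) =====
def Claim_equal_best_solution_i_think : Prop := ∀ (answers : List Int), Dom_best_solution_i_think answers → Spec_best_solution_i_think answers (best_solution_i_think answers)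

-- ===== LEMMAS AND PROOFS =====

-- modular-index match count starting at position n (A's per-student contribution)
def bsitCnt (pat : List Int) (n : Int) : List Int → Int
  | [] => 0
  | a :: as => (if PySem.List.pyGetD pat (PySem.Int.mod n (pat.length : Int)) 0 = a then 1 else 0) + bsitCnt pat (n + 1) as

theorem bsitStep_eq (ia : Int × Int) :
    ∀ x y z : Int, bsitStep [x, y, z] ia =
      [x + (if PySem.List.pyGetD [1, 2, 3, 4, 5] (PySem.Int.mod ia.1 5) 0 = ia.2 then 1 else 0),
       y + (if PySem.List.pyGetD [2, 1, 2, 3, 2, 4, 2, 5] (PySem.Int.mod ia.1 8) 0 = ia.2 then 1 else 0),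
       z + (if PySem.List.pyGetD [3, 3, 1, 1, 2, 2, 4, 4, 5, 5] (PySem.Int.mod ia.1 10) 0 = ia.2 then 1 else 0)] := by
  intro x y z
  simp only [bsitStep, bsitStudents, PySem.List.enumerate_cons, PySem.List.enumerate_nil,
    List.foldl_cons, List.foldl_nil]
  norm_num [List.set, List.getD]
  split_ifs <;> simp

theorem bsitFoldA (answers : List Int) :
    ∀ (n : Int) (x y z : Int),
      (PySem.List.enumerate answers n).foldl bsitStep [x, y, z] =
        [x + bsitCnt [1, 2, 3, 4, 5] n answers,
         y + bsitCnt [2, 1, 2, 3, 2, 4, 2, 5] n answers,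
         z + bsitCnt [3, 3, 1, 1, 2, 2, 4, 4, 5, 5] n answers] := by
  induction answers with
  | nil => intro n x y z; simp [PySem.List.enumerate_nil, bsitCnt]
  | cons a as ih =>
    intro n x y z
    rw [PySem.List.enumerate_cons, List.foldl_cons, bsitStep_eq, ih]
    simp only [bsitCnt]
    norm_num
    refine ⟨by ring, by ring, by ring⟩

-- sum over a duplicate-free list rs of the indicator "(r, q r) = (x1, x2)": 1 iff it is hit
theorem bsitIndSum (q : Int → Int) (x1 x2 : Int) :
    ∀ rs : List Int, rs.Nodup →
      (rs.map (fun r => if ((r, q r) : Int × Int) = (x1, x2) then (1 : Int) else 0)).sum =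
        if x1 ∈ rs ∧ q x1 = x2 then 1 else 0 := by
  intro rs
  induction rs with
  | nil => simp
  | cons r rs ih =>
    intro hnd
    rw [List.nodup_cons] at hnd
    rw [List.map_cons, List.sum_cons, ih hnd.2]
    simp only [Prod.mk.injEq, List.mem_cons]
    by_cases hr : r = x1
    · subst hr
      simp [hnd.1]
    · have hr' : ¬ x1 = r := fun h => hr h.symm
      simp only [hr, false_and, if_false, hr', false_or, zero_add]

-- B's table read equals A's modular match count: sum over residues r < 40 of the
-- number of (i mod 40, answers[i]) pairs equal to (r, pat[r mod L]) counts exactly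
-- the positions matching the cyclic pattern, since L divides 40.
theorem bsitSumCnt (pat : List Int) (hdvd : (pat.length : Int) ∣ 40) (hpos : 0 < pat.length)
    (answers : List Int) :
    ∀ n : Int, 0 ≤ n →
      ((PySem.List.pyRange 0 40 1).map (fun r =>
        ((((PySem.List.enumerate answers n).map (fun ia => (PySem.Int.mod ia.1 40, ia.2))).count
          ((r, PySem.List.pyGetD pat (PySem.Int.mod r (pat.length : Int)) 0) : Int × Int) : Int)))).sum
      = bsitCnt pat n answers := by
  induction answers with
  | nil =>
    intro n _
    simp [PySem.List.enumerate_nil, bsitCnt]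
  | cons a as ih =>
    intro n hn
    have hLpos : (0 : Int) < (pat.length : Int) := by exact_mod_cast hpos
    rw [PySem.List.enumerate_cons, List.map_cons]
    have hcount : ∀ r : Int,
        ((((PySem.Int.mod n 40, a) :: (PySem.List.enumerate as (n+1)).map (fun ia => (PySem.Int.mod ia.1 40, ia.2))).count
          ((r, PySem.List.pyGetD pat (PySem.Int.mod r (pat.length : Int)) 0) : Int × Int) : Int))
        = (((PySem.List.enumerate as (n+1)).map (fun ia => (PySem.Int.mod ia.1 40, ia.2))).count
            ((r, PySem.List.pyGetD pat (PySem.Int.mod r (pat.length : Int)) 0) : Int × Int) : Int)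
          + (if ((r, PySem.List.pyGetD pat (PySem.Int.mod r (pat.length : Int)) 0) : Int × Int) = (PySem.Int.mod n 40, a) then 1 else 0) := by
      intro r
      rw [List.count_cons]
      simp only [beq_iff_eq]
      by_cases hP : ((r, PySem.List.pyGetD pat (PySem.Int.mod r (pat.length : Int)) 0) : Int × Int) = (PySem.Int.mod n 40, a)
      · rw [if_pos hP.symm, if_pos hP]; push_cast; ring
      · rw [if_neg (Ne.symm hP), if_neg hP]; push_cast; ring
    have hsplit :
        ((PySem.List.pyRange 0 40 1).map (fun r =>
          ((((PySem.Int.mod n 40, a) :: (PySem.List.enumerate as (n+1)).map (fun ia => (PySem.Int.mod ia.1 40, ia.2))).count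
            ((r, PySem.List.pyGetD pat (PySem.Int.mod r (pat.length : Int)) 0) : Int × Int) : Int)))).sum
        = ((PySem.List.pyRange 0 40 1).map (fun r =>
            (((PySem.List.enumerate as (n+1)).map (fun ia => (PySem.Int.mod ia.1 40, ia.2))).count
              ((r, PySem.List.pyGetD pat (PySem.Int.mod r (pat.length : Int)) 0) : Int × Int) : Int))).sum
          + ((PySem.List.pyRange 0 40 1).map (fun r =>
              (if ((r, PySem.List.pyGetD pat (PySem.Int.mod r (pat.length : Int)) 0) : Int × Int) = (PySem.Int.mod n 40, a) then (1:Int) else 0))).sum := by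
      rw [← List.sum_map_add]
      exact congrArg List.sum (List.map_congr_left (fun r _ => hcount r))
    rw [hsplit, ih (n+1) (by omega),
      bsitIndSum (fun r => PySem.List.pyGetD pat (PySem.Int.mod r (pat.length : Int)) 0) (PySem.Int.mod n 40) a _
        (PySem.List.nodup_pyRange_one 0 40)]
    have hm40 : PySem.Int.mod n 40 = n % 40 := PySem.Int.mod_eq_emod_of_pos (by norm_num)
    have h0 : 0 ≤ n % 40 := Int.emod_nonneg n (by norm_num)
    have h40 : n % 40 < 40 := Int.emod_lt_of_pos n (by norm_num)
    have hmem : PySem.Int.mod n 40 ∈ PySem.List.pyRange 0 40 1 := by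
      rw [PySem.List.mem_pyRange_one, hm40]; omega
    have hq : PySem.List.pyGetD pat (PySem.Int.mod (PySem.Int.mod n 40) (pat.length : Int)) 0
        = PySem.List.pyGetD pat (PySem.Int.mod n (pat.length : Int)) 0 := by
      rw [hm40, PySem.Int.mod_eq_emod_of_pos hLpos, PySem.Int.mod_eq_emod_of_pos hLpos,
        Int.emod_emod_of_dvd n hdvd]
    simp only [bsitCnt, hq]
    by_cases hEq : PySem.List.pyGetD pat (PySem.Int.mod n (pat.length : Int)) 0 = a
    · rw [if_pos ⟨hmem, hEq⟩, if_pos hEq]; ring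
    · rw [if_neg (fun h => hEq h.2), if_neg hEq]; ring

-- ===== VERDICT (by name: the statement is the Claim_ definition above) =====
theorem best_solution_i_think_spec : Claim_equal_best_solution_i_think := by
  intro answers _
  unfold Spec_best_solution_i_think best_solution_i_think best_solution_i_think_alt
  have hA := bsitFoldA answers 0 0 0 0
  have h0 := bsitSumCnt [1,2,3,4,5] (by decide) (by decide) answers 0 (by decide)
  have h1 := bsitSumCnt [2,1,2,3,2,4,2,5] (by decide) (by decide) answers 0 (by decide)
  have h2 := bsitSumCnt [3,3,1,1,2,2,4,4,5,5] (by decide) (by decide) answers 0 (by decide)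
  simp only [show List.replicate bsitStudents.length (0:Int) = [0, 0, 0] from rfl,
    List.map, hA, PySem.Dict.getD_counter, h0, h1, h2, zero_add]
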